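-- pv_equiv track=rewrite | github.com/HermanL02/prometheus-beta | src/unique_substrings.py | get_unique_substrings
-- ===== SOURCE A (Python) =====
-- from typing import List
--
-- def get_unique_substrings(s: str) -> List[str]:
--     """
--     Generate all unique substrings within the given string.
--
--     Args:
--         s (str): Input string to extract unique substrings from.
--
--     Returns:
--         List[str]: A list of unique substrings in the input string.
--
--     Examples:
--         >>> get_unique_substrings('abcb')
--         ['a', 'ab', 'abc', 'abcb', 'b', 'bc', 'bcb', 'c', 'cb']
--         >>> get_unique_substrings('')
--         []
--         >>> get_unique_substrings('abcd')
--         ['a', 'ab', 'abc', 'abcd', 'b', 'bc', 'bcd', 'c', 'cd', 'd']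
--         >>> get_unique_substrings('aaa')
--         ['a', 'aa', 'aaa']
--         >>> get_unique_substrings('x')
--         ['x']
--         >>> get_unique_substrings('hello')
--         ['e', 'el', 'ell', 'ello', 'h', 'he', 'hel', 'hell', 'hello', 'l', 'll', 'llo', 'lo', 'o']
--     """
--     # Handle empty string case
--     if not s:
--         return []
--
--     # Use a set to ensure uniqueness
--     unique_substrings = set()
--
--     # Generate all possible substrings
--     for start in range(len(s)):
--         for end in range(start + 1, len(s) + 1):
--             unique_substrings.add(s[start:end])
--
--     # Convert set to sorted list for consistent output
--     return sorted(list(unique_substrings))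
-- ===== SOURCE B (Python) =====
-- def get_unique_substrings(s):
--     """Suffix-trie DFS: enumerate distinct substrings directly in lexicographic
--     order (children visited in sorted char order), so no global sort is needed."""
--     n = len(s)
--     out = []
--     # stack of (prefix, positions); positions are the indices of the character
--     # that would extend each occurrence of prefix by one
--     stack = [("", list(range(n)))]
--     while stack:
--         prefix, positions = stack.pop()
--         if prefix:
--             out.append(prefix)
--         for c in sorted({s[j] for j in positions}, reverse=True):
--             stack.append((prefix + c, [j + 1 for j in positions if s[j] == c and j + 1 < n]))
--     return out
-- ===== Notes on version B (the rewrite author's own statement) =====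
-- stated objective: faster
-- what changed: Instead of collecting all O(n^2) slices into a set and sorting them, B runs an explicit-stack suffix-trie DFS over occurrence-position lists, visiting children in sorted character order, so every distinct substring is emitted exactly once and already in lexicographic order with no sort over substrings.
import Mathlib
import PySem

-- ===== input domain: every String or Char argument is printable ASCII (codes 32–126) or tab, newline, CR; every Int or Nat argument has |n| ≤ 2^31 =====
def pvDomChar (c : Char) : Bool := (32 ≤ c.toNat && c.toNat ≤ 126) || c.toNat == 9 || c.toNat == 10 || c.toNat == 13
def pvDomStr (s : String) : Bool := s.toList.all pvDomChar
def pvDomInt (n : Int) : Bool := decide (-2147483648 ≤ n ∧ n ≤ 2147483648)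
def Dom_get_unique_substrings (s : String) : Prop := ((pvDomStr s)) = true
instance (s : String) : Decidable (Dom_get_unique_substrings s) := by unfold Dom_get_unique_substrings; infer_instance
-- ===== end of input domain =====

-- B replaces "collect every slice into a set, then sort" by an explicit-stack suffix-trie DFS
-- that emits the distinct substrings directly in lexicographic order (objective: faster).

-- ===== PORT A =====
def get_unique_substrings (s : String) : List String :=
  if PySem.Str.len s = 0 then []          -- `if not s: return []`
  else
    -- for start in range(len(s)): for end in range(start+1, len(s)+1): set.add(s[start:end])
    let uniq : PySem.Set String :=
      (PySem.List.pyRange 0 (PySem.Str.len s)).foldl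
        (fun acc start =>
          (PySem.List.pyRange (start + 1) (PySem.Str.len s + 1)).foldl
            (fun acc2 e => acc2.add (PySem.Str.slice s (some start) (some e))) acc)
        PySem.Set.empty
    PySem.List.sorted uniq (fun x => x)

-- ===== PORT B =====
-- positions = indices of the character that would extend each occurrence of prefix by one
def pvCharB (cs : List Char) (j : Nat) : Char := cs.getD j default

-- [j + 1 for j in positions if s[j] == c and j + 1 < n]
def pvChildPosB (cs : List Char) (ps : List Nat) (c : Char) : List Nat :=
  (ps.filter (fun j => pvCharB cs j == c && decide (j + 1 < cs.length))).map (· + 1)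

-- the while-loop over the explicit stack (top of stack = head; `fuel` only makes the
-- recursion structural, it is provably never exhausted on the initial call below)
def pvLoopB (cs : List Char) : Nat → List (List Char × List Nat) → List (List Char) → List (List Char)
  | 0, _, out => out
  | _ + 1, [], out => out
  | f + 1, (pre, ps) :: rest, out =>
      pvLoopB cs f
        -- for c in sorted({s[j] for j in positions}, reverse=True): stack.append(...)
        ((PySem.List.sorted (PySem.Set.ofList (ps.map (pvCharB cs))) (fun x => x) true).foldl
          (fun st c => (pre ++ [c], pvChildPosB cs ps c) :: st) rest)
        (if pre = [] then out else out ++ [pre])   -- if prefix: out.append(prefix)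

def get_unique_substrings_alt (s : String) : List String :=
  (pvLoopB s.toList ((s.toList.length + 1) * (s.toList.length + 1) + 1)
      [(([] : List Char), List.range s.toList.length)] []).map String.ofList

-- ===== PRECONDITION & SPEC =====
def Spec_get_unique_substrings (s : String) (out : List String) : Prop := out = get_unique_substrings_alt s
instance (s : String) (out : List String) : Decidable (Spec_get_unique_substrings s out) := by unfold Spec_get_unique_substrings; infer_instance

-- ===== CLAIM (what is proved, stated in full; the proofs are below) =====
def Claim_equal_get_unique_substrings : Prop := ∀ (s : String), Dom_get_unique_substrings s → Spec_get_unique_substrings s (get_unique_substrings s)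

-- ===== LEMMAS AND PROOFS =====

-- ascending sorted distinct next characters (proof-side view of the loop's reverse-sorted push)
def pvCharsB (cs : List Char) (ps : List Nat) : List Char :=
  PySem.List.sorted (PySem.Set.ofList (ps.map (pvCharB cs))) (fun x => x)

-- reference recursive DFS (proof helper; fuelled)
def pvDfs (cs : List Char) : Nat → List Char → List Nat → List (List Char)
  | 0, _, _ => []
  | f + 1, pre, ps =>
      (pvCharsB cs ps).flatMap fun c => (pre ++ [c]) :: pvDfs cs f (pre ++ [c]) (pvChildPosB cs ps c)

def pvDF (cs : List Char) (pre : List Char) (ps : List Nat) : List (List Char) :=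
  pvDfs cs cs.length pre ps

-- invariant: ps is exactly the set of j < |cs| such that pre occurs ending at j
def pvGood (cs : List Char) (pre : List Char) (ps : List Nat) : Prop :=
  ∀ j : Nat, j ∈ ps ↔ (j < cs.length ∧ pre <:+ cs.take j)

def pvEmit (cs : List Char) (e : List Char × List Nat) : List (List Char) :=
  (if e.1 = [] then [] else [e.1]) ++ pvDF cs e.1 e.2

lemma pv_take_succ {cs : List Char} {j : Nat} (hj : j < cs.length) :
    cs.take (j + 1) = cs.take j ++ [cs[j]] := by
  rw [List.take_add_one, List.getElem?_eq_getElem hj]; rfl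

lemma pv_extend_suffix {cs pre : List Char} {j : Nat} {c : Char} (hj : j < cs.length) :
    (pre <:+ cs.take j ∧ cs[j] = c) ↔ pre ++ [c] <:+ cs.take (j + 1) := by
  rw [pv_take_succ hj]
  constructor
  · rintro ⟨⟨u, hu⟩, hc⟩
    exact ⟨u, by rw [← hu, hc, List.append_assoc]⟩
  · rintro ⟨u, hu⟩
    rw [← List.append_assoc] at hu
    obtain ⟨h1, h2⟩ := List.append_inj' hu rfl
    have hc : cs[j] = c := by simpa using h2.symm
    exact ⟨⟨u, h1⟩, hc⟩

lemma pv_infix_iff_suffix_take {p cs : List Char} :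
    p <:+: cs ↔ ∃ j, j ≤ cs.length ∧ p <:+ cs.take j := by
  constructor
  · rintro ⟨u, v, rfl⟩
    refine ⟨u.length + p.length, by simp, ?_⟩
    rw [show u.length + p.length = (u ++ p).length by simp, List.take_left]
    exact List.suffix_append u p
  · rintro ⟨j, _, u, hu⟩
    exact ⟨u, cs.drop j, by rw [hu, List.take_append_drop]⟩

lemma pv_mem_charsB {cs pre : List Char} {ps : List Nat} (hg : pvGood cs pre ps) (c : Char) :
    c ∈ pvCharsB cs ps ↔ (pre ++ [c]) <:+: cs := by
  have h1 : c ∈ pvCharsB cs ps ↔ ∃ j ∈ ps, pvCharB cs j = c := by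
    simp [pvCharsB, PySem.List.mem_sorted, PySem.Set.mem_ofList]
  rw [h1, pv_infix_iff_suffix_take]
  constructor
  · rintro ⟨j, hj, rfl⟩
    obtain ⟨hjn, hsuf⟩ := (hg j).mp hj
    have hc : cs[j] = pvCharB cs j := (List.getD_eq_getElem _ _ hjn).symm
    exact ⟨j + 1, by omega, (pv_extend_suffix hjn).mp ⟨hsuf, hc⟩⟩
  · rintro ⟨k, hk, hsuf⟩
    have hlen : pre.length + 1 ≤ k := by
      have := hsuf.length_le
      simp at this; omega
    obtain ⟨j, rfl⟩ : ∃ j, k = j + 1 := ⟨k - 1, by omega⟩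
    have hjn : j < cs.length := by omega
    obtain ⟨hpre, hc⟩ := (pv_extend_suffix hjn).mpr hsuf
    exact ⟨j, (hg j).mpr ⟨hjn, hpre⟩, by rw [pvCharB, List.getD_eq_getElem _ _ hjn, hc]⟩

lemma pv_good_child {cs pre : List Char} {ps : List Nat} (hg : pvGood cs pre ps) (c : Char) :
    pvGood cs (pre ++ [c]) (pvChildPosB cs ps c) := by
  intro k
  simp only [pvChildPosB, List.mem_map, List.mem_filter, Bool.and_eq_true, beq_iff_eq,
    decide_eq_true_eq]
  constructor
  · rintro ⟨j, ⟨hj, hcj, hjn1⟩, rfl⟩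
    obtain ⟨hjn, hsuf⟩ := (hg j).mp hj
    have hc : cs[j] = c := by rw [← hcj, pvCharB, List.getD_eq_getElem _ _ hjn]
    exact ⟨hjn1, (pv_extend_suffix hjn).mp ⟨hsuf, hc⟩⟩
  · rintro ⟨hkn, hsuf⟩
    have hlen : pre.length + 1 ≤ k := by
      have h2 := hsuf.length_le
      have h3 : k ≤ cs.length := by omega
      simp at h2; omega
    obtain ⟨j, rfl⟩ : ∃ j, k = j + 1 := ⟨k - 1, by omega⟩
    have hjn : j < cs.length := by omega
    obtain ⟨hpre, hc⟩ := (pv_extend_suffix hjn).mpr hsuf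
    exact ⟨j, ⟨(hg j).mpr ⟨hjn, hpre⟩, by rw [pvCharB, List.getD_eq_getElem _ _ hjn, hc], hkn⟩, rfl⟩

lemma pv_ps_nil_of_len {cs pre : List Char} {ps : List Nat} (hg : pvGood cs pre ps)
    (h : cs.length ≤ pre.length) : ps = [] := by
  rw [List.eq_nil_iff_forall_not_mem]
  intro j hj
  obtain ⟨hjn, hsuf⟩ := (hg j).mp hj
  have := hsuf.length_le
  simp at this; omega

lemma pv_charsB_nil (cs : List Char) : pvCharsB cs [] = [] := by
  rw [pvCharsB, PySem.List.sorted_eq_nil_iff]; rfl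

lemma pv_dfs_fuel_congr {cs : List Char} : ∀ (f₁ f₂ : Nat) (pre : List Char) (ps : List Nat),
    pvGood cs pre ps → cs.length ≤ f₁ + pre.length → cs.length ≤ f₂ + pre.length →
    pvDfs cs f₁ pre ps = pvDfs cs f₂ pre ps := by
  intro f₁
  induction f₁ with
  | zero =>
    intro f₂ pre ps hg h1 _
    have hps : ps = [] := pv_ps_nil_of_len hg (by omega)
    subst hps
    cases f₂ <;> simp [pvDfs, pv_charsB_nil]
  | succ f IH =>
    intro f₂ pre ps hg h1 h2
    cases f₂ with
    | zero =>
      have hps : ps = [] := pv_ps_nil_of_len hg (by omega)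
      subst hps
      simp [pvDfs, pv_charsB_nil]
    | succ g =>
      simp only [pvDfs]
      congr 1
      funext c
      congr 1
      exact IH g (pre ++ [c]) _ (pv_good_child hg c) (by simp; omega) (by simp; omega)

lemma pv_DF_rec {cs pre : List Char} {ps : List Nat} (hg : pvGood cs pre ps) :
    pvDF cs pre ps
      = (pvCharsB cs ps).flatMap fun c => (pre ++ [c]) :: pvDF cs (pre ++ [c]) (pvChildPosB cs ps c) := by
  unfold pvDF
  cases hn : cs.length with
  | zero =>
    have hps : ps = [] := pv_ps_nil_of_len hg (by omega)
    subst hps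
    simp [pvDfs, pv_charsB_nil]
  | succ m =>
    simp only [pvDfs]
    congr 1
    funext c
    congr 1
    exact pv_dfs_fuel_congr m (m + 1) (pre ++ [c]) _ (pv_good_child hg c) (by simp; omega)
      (by simp; omega)

lemma pv_mem_DF {cs : List Char} : ∀ (fuel : Nat) (pre : List Char) (ps : List Nat) (q : List Char),
    pvGood cs pre ps → cs.length ≤ fuel + pre.length →
    (q ∈ pvDfs cs fuel pre ps ↔ pre <+: q ∧ pre ≠ q ∧ q <:+: cs) := by
  intro fuel
  induction fuel with
  | zero =>
    intro pre ps q hg h1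
    simp only [pvDfs, List.not_mem_nil, false_iff]
    rintro ⟨hpre, hne, hinf⟩
    have h2 := hpre.length_le
    have h3 := hinf.length_le
    exact hne (hpre.eq_of_length (by omega))
  | succ fuel IH =>
    intro pre ps q hg h1
    simp only [pvDfs, List.mem_flatMap, List.mem_cons]
    constructor
    · rintro ⟨c, hc, rfl | hq⟩
      · exact ⟨List.prefix_append pre [c], by simp, (pv_mem_charsB hg c).mp hc⟩
      · obtain ⟨hpre, hne, hinf⟩ := (IH (pre ++ [c]) _ q (pv_good_child hg c) (by simp; omega)).mp hq
        have h2 := hpre.length_le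
        refine ⟨(List.prefix_append pre [c]).trans hpre, ?_, hinf⟩
        intro h
        subst h
        simp at h2
    · rintro ⟨⟨r, rfl⟩, hne, hinf⟩
      cases r with
      | nil => simp at hne
      | cons c t =>
        have hp : pre ++ [c] <+: pre ++ c :: t := by
          refine ⟨t, by simp⟩
        have hcin : c ∈ pvCharsB cs ps := (pv_mem_charsB hg c).mpr (hp.isInfix.trans hinf)
        refine ⟨c, hcin, ?_⟩
        cases t with
        | nil => exact Or.inl rfl
        | cons d t' =>
          refine Or.inr ((IH (pre ++ [c]) _ _ (pv_good_child hg c) (by simp; omega)).mpr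
            ⟨hp, by simp, hinf⟩)

lemma pv_mem_DF' {cs pre : List Char} {ps : List Nat} {q : List Char} (hg : pvGood cs pre ps) :
    q ∈ pvDF cs pre ps ↔ pre <+: q ∧ pre ≠ q ∧ q <:+: cs :=
  pv_mem_DF cs.length pre ps q hg (by omega)

lemma pv_lex_of_strict_prefix : ∀ (p q : List Char), p <+: q → p ≠ q → p < q := by
  intro p
  induction p with
  | nil =>
    intro q _ hne
    cases q with
    | nil => exact absurd rfl hne
    | cons c t => exact List.Lex.nil
  | cons a p' IH =>
    rintro q ⟨r, rfl⟩ hne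
    show List.Lex _ (a :: p') (a :: (p' ++ r))
    refine List.Lex.cons ?_
    exact IH (p' ++ r) (List.prefix_append p' r) (fun h => hne (by simp [← h]))

lemma pv_lex_of_lt_head : ∀ (pre : List Char) {c c' : Char} {t t' : List Char}, c < c' →
    (pre ++ c :: t) < (pre ++ c' :: t') := by
  intro pre
  induction pre with
  | nil => intro c c' t t' h; exact List.Lex.rel h
  | cons a pre' IH =>
    intro c c' t t' h
    show List.Lex _ (a :: (pre' ++ c :: t)) (a :: (pre' ++ c' :: t'))
    refine List.Lex.cons ?_
    exact IH h

lemma pv_prefix_of_mem_block {cs pre : List Char} {ps : List Nat} {c : Char} {fuel : Nat}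
    (hg : pvGood cs pre ps) (hf : cs.length ≤ fuel + pre.length + 1) {x : List Char}
    (hx : x ∈ (pre ++ [c]) :: pvDfs cs fuel (pre ++ [c]) (pvChildPosB cs ps c)) :
    pre ++ [c] <+: x := by
  rcases List.mem_cons.mp hx with rfl | hx'
  · exact List.prefix_rfl
  · exact ((pv_mem_DF fuel (pre ++ [c]) _ x (pv_good_child hg c) (by simp; omega)).mp hx').1

lemma pv_pairwise_DF {cs : List Char} : ∀ (fuel : Nat) (pre : List Char) (ps : List Nat),
    pvGood cs pre ps → cs.length ≤ fuel + pre.length →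
    (pvDfs cs fuel pre ps).Pairwise (· < ·) := by
  intro fuel
  induction fuel with
  | zero => intro pre ps _ _; simp [pvDfs]
  | succ fuel IH =>
    intro pre ps hg h1
    simp only [pvDfs]
    rw [List.pairwise_flatMap]
    constructor
    · intro c _
      rw [List.pairwise_cons]
      refine ⟨?_, IH (pre ++ [c]) _ (pv_good_child hg c) (by simp; omega)⟩
      intro q hq
      obtain ⟨hpre, hne, _⟩ :=
        (pv_mem_DF fuel (pre ++ [c]) _ q (pv_good_child hg c) (by simp; omega)).mp hq
      exact pv_lex_of_strict_prefix _ _ hpre hne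
    · have hpw : (pvCharsB cs ps).Pairwise (· < ·) :=
        PySem.List.sorted_ofList_pairwise_lt _
      refine hpw.imp_of_mem ?_
      intro c c' hc hc' hlt x hx y hy
      obtain ⟨t, ht⟩ := pv_prefix_of_mem_block hg (by omega) hx
      obtain ⟨t', ht'⟩ := pv_prefix_of_mem_block hg (by omega) hy
      rw [← ht, ← ht']
      simp only [List.append_assoc, List.singleton_append]
      exact pv_lex_of_lt_head pre hlt

lemma pv_length_DF_root (cs : List Char) (hg : pvGood cs [] (List.range cs.length)) :
    (pvDF cs [] (List.range cs.length)).length ≤ (cs.length + 1) * (cs.length + 1) := by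
  have hpw : (pvDF cs [] (List.range cs.length)).Pairwise (· < ·) :=
    pv_pairwise_DF cs.length [] (List.range cs.length) hg (by omega)
  have hnd : (pvDF cs [] (List.range cs.length)).Nodup := hpw.imp (fun h => ne_of_lt h)
  have hsub : pvDF cs [] (List.range cs.length) ⊆
      (List.range (cs.length + 1)).flatMap
        (fun i => (List.range (cs.length + 1)).map (fun l => (cs.drop i).take l)) := by
    intro q hq
    obtain ⟨_, _, hinf⟩ := (pv_mem_DF' hg).mp hq
    obtain ⟨u, v, hc⟩ := hinf
    rw [List.mem_flatMap]
    refine ⟨u.length, List.mem_range.mpr ?_, List.mem_map.mpr ⟨q.length, List.mem_range.mpr ?_, ?_⟩⟩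
    · have : cs.length = u.length + q.length + v.length := by rw [← hc]; simp; omega
      omega
    · have : cs.length = u.length + q.length + v.length := by rw [← hc]; simp; omega
      omega
    · rw [← hc, List.append_assoc, List.drop_left, List.take_left]
  have hle := (hnd.subperm hsub).length_le
  calc (pvDF cs [] (List.range cs.length)).length
      ≤ ((List.range (cs.length + 1)).flatMap
          (fun i => (List.range (cs.length + 1)).map (fun l => (cs.drop i).take l))).length := hle
    _ = (cs.length + 1) * (cs.length + 1) := by
        simp [List.length_flatMap, List.map_const']

lemma pv_foldl_push {α β : Type} (f : α → β) :
    ∀ (l : List α) (st : List β), l.foldl (fun st c => f c :: st) st = (l.map f).reverse ++ st := by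
  intro l
  induction l with
  | nil => intro st; simp
  | cons a l IH => intro st; simp [IH]

lemma pv_sorted_true_eq (cs : List Char) (ps : List Nat) :
    PySem.List.sorted (PySem.Set.ofList (ps.map (pvCharB cs))) (fun x => x) true
      = (pvCharsB cs ps).reverse := by
  refine PySem.List.sorted_rev_eq_of_perm_of_pairwise_gt _ _ _ ?_ ?_
  · exact (List.reverse_perm _).trans (PySem.List.sorted_perm _ _ _)
  · exact List.pairwise_reverse.mpr (PySem.List.sorted_ofList_pairwise_lt _)

lemma pv_length_DF_rec {cs pre : List Char} {ps : List Nat} (hg : pvGood cs pre ps) :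
    (pvDF cs pre ps).length
      = ((pvCharsB cs ps).map
          (fun c => 1 + (pvDF cs (pre ++ [c]) (pvChildPosB cs ps c)).length)).sum := by
  rw [pv_DF_rec hg, List.length_flatMap]
  exact congrArg List.sum (List.map_congr_left (fun c _ => by simp [Nat.add_comm]))

lemma pv_loop_spec (cs : List Char) : ∀ (fuel : Nat) (stack : List (List Char × List Nat)) (out : List (List Char)),
    (∀ e ∈ stack, pvGood cs e.1 e.2) →
    (stack.map (fun e => 1 + (pvDF cs e.1 e.2).length)).sum ≤ fuel →
    pvLoopB cs fuel stack out = out ++ stack.flatMap (pvEmit cs) := by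
  intro fuel
  induction fuel with
  | zero =>
    intro stack out hgood hsum
    cases stack with
    | nil => simp [pvLoopB]
    | cons e rest => simp at hsum
  | succ fuel IH =>
    intro stack out hgood hsum
    cases stack with
    | nil => simp [pvLoopB]
    | cons e rest =>
      obtain ⟨pre, ps⟩ := e
      have hge : pvGood cs pre ps := hgood _ (List.mem_cons_self)
      show pvLoopB cs fuel _ _ = _
      rw [pv_sorted_true_eq, pv_foldl_push, List.map_reverse, List.reverse_reverse]
      have hnewgood : ∀ e ∈ (pvCharsB cs ps).map
          (fun c => (pre ++ [c], pvChildPosB cs ps c)) ++ rest, pvGood cs e.1 e.2 := by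
        intro e he
        rcases List.mem_append.mp he with h | h
        · obtain ⟨c, _, rfl⟩ := List.mem_map.mp h
          exact pv_good_child hge c
        · exact hgood _ (List.mem_cons_of_mem _ h)
      have hnewsum : (((pvCharsB cs ps).map (fun c => (pre ++ [c], pvChildPosB cs ps c)) ++ rest).map
          (fun e => 1 + (pvDF cs e.1 e.2).length)).sum ≤ fuel := by
        rw [List.map_append, List.sum_append, List.map_map]
        have h1 : (((pvCharsB cs ps).map
            ((fun e => 1 + (pvDF cs e.1 e.2).length) ∘ fun c => (pre ++ [c], pvChildPosB cs ps c)))).sum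
            = (pvDF cs pre ps).length := by
          rw [pv_length_DF_rec hge]; rfl
        rw [h1]
        rw [List.map_cons, List.sum_cons] at hsum
        dsimp only at hsum
        omega
      rw [IH _ _ hnewgood hnewsum]
      simp only [List.flatMap_append, List.flatMap_cons, List.flatMap_map]
      have hblock : (pvCharsB cs ps).flatMap
          (fun c => pvEmit cs (pre ++ [c], pvChildPosB cs ps c)) = pvDF cs pre ps := by
        rw [pv_DF_rec hge]
        congr 1
        funext c
        simp [pvEmit]
      rw [hblock, pvEmit]
      by_cases hpre : pre = [] <;> simp [hpre]

lemma pv_good_root (cs : List Char) : pvGood cs [] (List.range cs.length) := by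
  intro j
  simp [List.mem_range]

-- A-side: membership and nodup of the folded set
lemma pv_mem_foldl_add {α β : Type} [BEq α] [LawfulBEq α] (P : β → α → Prop)
    (F : PySem.Set α → β → PySem.Set α) (hF : ∀ a x y, y ∈ F a x ↔ y ∈ a ∨ P x y) :
    ∀ (l : List β) (acc : PySem.Set α) (y : α),
      y ∈ l.foldl F acc ↔ y ∈ acc ∨ ∃ x ∈ l, P x y := by
  intro l
  induction l with
  | nil => intro acc y; simp
  | cons a l IH =>
    intro acc y
    rw [List.foldl_cons, IH, hF]
    simp only [List.mem_cons]
    constructor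
    · rintro ((h | h) | ⟨x, hx, hP⟩)
      · exact Or.inl h
      · exact Or.inr ⟨a, Or.inl rfl, h⟩
      · exact Or.inr ⟨x, Or.inr hx, hP⟩
    · rintro (h | ⟨x, (rfl | hx), hP⟩)
      · exact Or.inl (Or.inl h)
      · exact Or.inl (Or.inr hP)
      · exact Or.inr ⟨x, hx, hP⟩

lemma pv_nodup_foldl_add {α β : Type} (F : PySem.Set α → β → PySem.Set α)
    (hF : ∀ a x, List.Nodup a → List.Nodup (F a x)) :
    ∀ (l : List β) (acc : PySem.Set α), List.Nodup acc → List.Nodup (l.foldl F acc) := by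
  intro l
  induction l with
  | nil => intro acc h; exact h
  | cons a l IH => intro acc h; exact IH _ (hF _ _ h)

lemma pv_infix_iff_slice {cs t : List Char} (h0 : t ≠ []) :
    t <:+: cs ↔ ∃ i k : Nat, i < cs.length ∧ i + 1 ≤ k ∧ k ≤ cs.length ∧ t = (cs.drop i).take (k - i) := by
  constructor
  · rintro ⟨u, v, hc⟩
    have hlen : cs.length = u.length + t.length + v.length := by rw [← hc]; simp; omega
    have ht0 : 1 ≤ t.length := by
      cases t with
      | nil => exact absurd rfl h0
      | cons _ _ => simp
    refine ⟨u.length, u.length + t.length, by omega, by omega, by omega, ?_⟩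
    rw [← hc, List.append_assoc, List.drop_left]
    rw [show u.length + t.length - u.length = t.length by omega]
    rw [List.take_left]
  · rintro ⟨i, k, hi, hik, hk, rfl⟩
    refine ⟨cs.take i, (cs.drop i).drop (k - i), ?_⟩
    rw [List.append_assoc, List.take_append_drop, List.take_append_drop]

lemma pv_alt_eq (s : String) :
    get_unique_substrings_alt s
      = (pvDF s.toList [] (List.range s.toList.length)).map String.ofList := by
  unfold get_unique_substrings_alt
  rw [pv_loop_spec s.toList _ _ _ ?_ ?_]
  · simp [pvEmit]
  · intro e he
    simp only [List.mem_singleton] at he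
    subst he
    exact pv_good_root s.toList
  · simp only [List.map_cons, List.map_nil, List.sum_cons, List.sum_nil]
    have := pv_length_DF_root s.toList (pv_good_root s.toList)
    omega

lemma pv_mem_alt (s : String) (q : String) :
    q ∈ get_unique_substrings_alt s ↔ q.toList ≠ [] ∧ q.toList <:+: s.toList := by
  rw [pv_alt_eq]
  have hmm : q ∈ (pvDF s.toList [] (List.range s.toList.length)).map String.ofList
      ↔ q.toList ∈ pvDF s.toList [] (List.range s.toList.length) := by
    rw [List.mem_map]
    constructor
    · rintro ⟨t, ht, rfl⟩; rwa [String.toList_ofList]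
    · intro h; exact ⟨q.toList, h, String.ofList_toList⟩
  rw [hmm, pv_mem_DF' (pv_good_root s.toList)]
  constructor
  · rintro ⟨_, hne, hinf⟩; exact ⟨fun h => hne h.symm, hinf⟩
  · rintro ⟨hne, hinf⟩; exact ⟨List.nil_prefix, fun h => hne h.symm, hinf⟩

lemma pv_pairwise_alt (s : String) :
    (get_unique_substrings_alt s).Pairwise (· < ·) := by
  rw [pv_alt_eq]
  have hpwL := pv_pairwise_DF s.toList.length [] (List.range s.toList.length)
    (pv_good_root s.toList) (by simp)
  exact List.pairwise_map.mpr (hpwL.imp (fun h =>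
    String.lt_iff_toList_lt.mpr (by simpa using h)))

lemma pv_slice_eq (s : String) (i k : Nat) :
    PySem.Str.slice s (some (i : Int)) (some (k : Int))
      = String.ofList ((s.toList.drop i).take (k - i)) := by
  simp [PySem.Str.slice, PySem.Chars.slice_eq_listSlice, PySem.List.slice_natCast]

theorem pv_main (s : String) : get_unique_substrings s = get_unique_substrings_alt s := by
  have hlen : PySem.Str.len s = (s.toList.length : Int) := by simp [PySem.Str.len]
  by_cases hn : s.toList = []
  · unfold get_unique_substrings
    rw [if_pos (by rw [hlen, hn]; simp)]
    rw [pv_alt_eq, hn]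
    simp [pvDF, pvDfs]
  · unfold get_unique_substrings
    have hne0 : ¬ (PySem.Str.len s = 0) := by
      rw [hlen]
      intro h
      exact hn (List.length_eq_zero_iff.mp (by exact_mod_cast h))
    rw [if_neg hne0]
    have hinner : ∀ (st : Int) (a : PySem.Set String) (y : String),
        y ∈ (PySem.List.pyRange (st + 1) (PySem.Str.len s + 1)).foldl
              (fun acc2 e => PySem.Set.add acc2 (PySem.Str.slice s (some st) (some e))) a
          ↔ y ∈ a ∨ ∃ e ∈ PySem.List.pyRange (st + 1) (PySem.Str.len s + 1),
              y = PySem.Str.slice s (some st) (some e) := by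
      intro st a y
      exact pv_mem_foldl_add (fun e y => y = PySem.Str.slice s (some st) (some e)) _
        (fun a x y => by rw [PySem.Set.mem_add]) _ a y
    have hmemU : ∀ y : String,
        y ∈ (PySem.List.pyRange 0 (PySem.Str.len s)).foldl
              (fun acc start =>
                (PySem.List.pyRange (start + 1) (PySem.Str.len s + 1)).foldl
                  (fun acc2 e => PySem.Set.add acc2 (PySem.Str.slice s (some start) (some e))) acc)
              PySem.Set.empty
          ↔ y.toList ≠ [] ∧ y.toList <:+: s.toList := by
      intro y
      rw [pv_mem_foldl_add
        (fun st y => ∃ e ∈ PySem.List.pyRange (st + 1) (PySem.Str.len s + 1),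
          y = PySem.Str.slice s (some st) (some e)) _ (fun a x y => hinner x a y) _ _ y]
      have hempty : y ∈ (PySem.Set.empty : PySem.Set String) ↔ False := by
        simp [PySem.Set.empty]
      rw [hempty, false_or]
      constructor
      · rintro ⟨st, hst, e, he, rfl⟩
        rw [PySem.List.mem_pyRange_one, hlen] at hst he
        obtain ⟨i, rfl⟩ : ∃ i : Nat, st = (i : Int) := ⟨st.toNat, (Int.toNat_of_nonneg hst.1).symm⟩
        obtain ⟨k, rfl⟩ : ∃ k : Nat, e = (k : Int) :=
          ⟨e.toNat, (Int.toNat_of_nonneg (by omega)).symm⟩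
        have hi : i < s.toList.length := by exact_mod_cast hst.2
        have hik : i + 1 ≤ k := by exact_mod_cast he.1
        have hk : k ≤ s.toList.length := by omega
        rw [pv_slice_eq, String.toList_ofList]
        have hsl : s.toList.length = s.length := by simp
        have hlt : ((s.toList.drop i).take (k - i)).length = k - i := by
          simp [List.length_take, List.length_drop]
          omega
        have hne : (s.toList.drop i).take (k - i) ≠ [] := by
          intro h
          rw [h] at hlt
          simp at hlt
          omega
        exact ⟨hne, (pv_infix_iff_slice hne).mpr ⟨i, k, hi, hik, hk, rfl⟩⟩
      · rintro ⟨hne, hinf⟩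
        obtain ⟨i, k, hi, hik, hk, heq⟩ := (pv_infix_iff_slice hne).mp hinf
        refine ⟨(i : Int), ?_, (k : Int), ?_, ?_⟩
        · rw [PySem.List.mem_pyRange_one, hlen]; omega
        · rw [PySem.List.mem_pyRange_one, hlen]; omega
        · rw [pv_slice_eq, ← heq]
          exact String.ofList_toList.symm
    have hpair := pv_pairwise_alt s
    have hndAlt : (get_unique_substrings_alt s).Nodup := hpair.imp (fun h => ne_of_lt h)
    have hndU := pv_nodup_foldl_add
      (fun (acc : PySem.Set String) (start : Int) =>
        (PySem.List.pyRange (start + 1) (PySem.Str.len s + 1)).foldl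
          (fun acc2 e => PySem.Set.add acc2 (PySem.Str.slice s (some start) (some e))) acc)
      (fun a x h => pv_nodup_foldl_add _
        (fun a2 x2 h2 => PySem.Set.nodup_add _ _ h2) _ a h)
      (PySem.List.pyRange 0 (PySem.Str.len s)) PySem.Set.empty List.nodup_nil
    have hperm : (get_unique_substrings_alt s).Perm
        ((PySem.List.pyRange 0 (PySem.Str.len s)).foldl
          (fun acc start =>
            (PySem.List.pyRange (start + 1) (PySem.Str.len s + 1)).foldl
              (fun acc2 e => PySem.Set.add acc2 (PySem.Str.slice s (some start) (some e))) acc)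
          PySem.Set.empty) := by
      rw [List.perm_ext_iff_of_nodup hndAlt hndU]
      intro a
      rw [pv_mem_alt, hmemU a]
    exact PySem.List.sorted_eq_of_perm_of_pairwise_lt _ _ (fun x => x) hperm hpair

-- ===== VERDICT (by name: the statement is the Claim_ definition above) =====
theorem get_unique_substrings_spec : Claim_equal_get_unique_substrings := by
  intro s _
  unfold Spec_get_unique_substrings
  exact pv_main s
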